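-- pv_equiv track=rewrite | github.com/Skylerliutian/COMP9021 | 9021/9021_assignment1/quiz_5.py | built_compare_set_s
-- ===== SOURCE A (Python) =====
-- def built_compare_set_s(length):
--     compare = []
--     for i in range(length):
--         if i%2 == 0:
--             compare.append(int(i / 2))
--         else:
--             compare.append(int(-(i + 1)/2))
--     return compare
-- ===== SOURCE B (Python) =====
-- def _pairs(half):
--     compare = []
--     for k in range(half):
--         compare.append(k)
--         compare.append(-(k + 1))
--     return compare
--
--
-- def built_compare_set_s(length):
--     compare = _pairs(length // 2)
--     if length > 0 and length % 2:
--         compare.append(length // 2)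
--     return compare
-- ===== Notes on version B (the rewrite author's own statement) =====
-- stated objective: faster
-- what changed: B builds the list pairwise in half as many loop iterations, appending each pair (k, -(k+1)) at once and adding the odd-length middle value afterwards, instead of branching on the parity of every index and doing float division per element.
import Mathlib
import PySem

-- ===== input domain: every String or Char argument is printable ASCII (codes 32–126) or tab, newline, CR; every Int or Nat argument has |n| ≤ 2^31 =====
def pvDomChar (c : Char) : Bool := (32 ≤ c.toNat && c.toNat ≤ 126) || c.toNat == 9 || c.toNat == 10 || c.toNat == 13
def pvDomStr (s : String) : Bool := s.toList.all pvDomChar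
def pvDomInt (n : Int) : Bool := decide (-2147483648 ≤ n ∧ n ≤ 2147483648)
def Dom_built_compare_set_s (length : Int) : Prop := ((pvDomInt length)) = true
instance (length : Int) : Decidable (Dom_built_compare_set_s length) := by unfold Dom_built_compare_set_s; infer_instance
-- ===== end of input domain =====

-- B builds the list half-iteration-wise: each loop step appends the pair (k, -(k+1)), and
-- an odd length appends the middle value length//2 afterwards; same O(n) cost, no per-index parity branch.

-- ===== PORT A =====
-- int(i/2) (float true division then truncation) is exact here: in each branch the numerator
-- (i, resp. i+1) is even and |i| ≤ 2^31 < 2^53, so it equals floor division.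
def built_compare_set_s (length : Int) : List Int :=
  (PySem.List.pyRange 0 length 1).foldl
    (fun compare i =>
      if PySem.Int.mod i 2 == 0 then
        compare ++ [PySem.Int.floordiv i 2]
      else
        compare ++ [-(PySem.Int.floordiv (i + 1) 2)])
    []

-- ===== PORT B =====
-- port of Source B's helper _pairs
def pvPairs (half : Int) : List Int :=
  (PySem.List.pyRange 0 half 1).foldl (fun compare k => compare ++ [k, -(k + 1)]) []

def built_compare_set_s_alt (length : Int) : List Int :=
  let compare := pvPairs (PySem.Int.floordiv length 2)
  if 0 < length ∧ PySem.Int.mod length 2 ≠ 0 then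
    compare ++ [PySem.Int.floordiv length 2]
  else
    compare

-- ===== PRECONDITION & SPEC =====
def Spec_built_compare_set_s (length : Int) (out : List Int) : Prop := out = built_compare_set_s_alt length
instance (length : Int) (out : List Int) : Decidable (Spec_built_compare_set_s length out) := by unfold Spec_built_compare_set_s; infer_instance

-- ===== CLAIM (what is proved, stated in full; the proofs are below) =====
def Claim_equal_built_compare_set_s : Prop := ∀ (length : Int), Dom_built_compare_set_s length → Spec_built_compare_set_s length (built_compare_set_s length)

-- ===== LEMMAS AND PROOFS =====

lemma stepA (m : Int) (h : 0 ≤ m) :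
    built_compare_set_s (m + 1) =
      built_compare_set_s m ++
        [if PySem.Int.mod m 2 == 0 then PySem.Int.floordiv m 2
         else -(PySem.Int.floordiv (m + 1) 2)] := by
  unfold built_compare_set_s
  rw [PySem.List.pyRange_one_succ_right h, List.foldl_append]
  simp only [List.foldl_cons, List.foldl_nil]
  split <;> rfl

lemma stepG (h : Int) (hh : 0 ≤ h) :
    pvPairs (h + 1) = pvPairs h ++ [h, -(h + 1)] := by
  unfold pvPairs
  rw [PySem.List.pyRange_one_succ_right hh, List.foldl_append]
  simp

lemma fd_two (a : Int) : PySem.Int.floordiv a 2 = a / 2 :=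
  PySem.Int.floordiv_eq_ediv_of_pos (by omega)

lemma md_two (a : Int) : PySem.Int.mod a 2 = a % 2 :=
  PySem.Int.mod_eq_emod_of_pos (by omega)

lemma parity (k : Nat) :
    built_compare_set_s (2 * (k : Int)) = pvPairs (k : Int) ∧
    built_compare_set_s (2 * (k : Int) + 1) = pvPairs (k : Int) ++ [(k : Int)] := by
  induction k with
  | zero => constructor <;> decide
  | succ k ih =>
    have hk : (0:Int) ≤ (k : Int) := by positivity
    have h1 : built_compare_set_s (2 * ((k:Int) + 1)) = pvPairs ((k:Int) + 1) := by
      have : (2 * ((k:Int) + 1)) = (2 * (k:Int) + 1) + 1 := by ring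
      rw [this, stepA _ (by omega), ih.2, stepG _ hk]
      have hm : PySem.Int.mod (2 * (k:Int) + 1) 2 = 1 := by rw [md_two]; omega
      have hf : PySem.Int.floordiv (2 * (k:Int) + 1 + 1) 2 = (k:Int) + 1 := by
        rw [fd_two]; omega
      rw [if_neg (by rw [hm]; decide), hf]
      simp
    refine ⟨by push_cast; exact h1, ?_⟩
    rw [show (2 * ((k:Nat)+1 : Nat) : Int) + 1 = 2 * ((k:Int) + 1) + 1 by push_cast; ring]
    rw [stepA _ (by omega), h1]
    have hm : PySem.Int.mod (2 * ((k:Int) + 1)) 2 = 0 := by rw [md_two]; omega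
    have hf : PySem.Int.floordiv (2 * ((k:Int) + 1)) 2 = (k:Int) + 1 := by rw [fd_two]; omega
    rw [if_pos (by rw [hm]; decide), hf]
    push_cast
    simp

-- ===== VERDICT (by name: the statement is the Claim_ definition above) =====
theorem built_compare_set_s_spec : Claim_equal_built_compare_set_s := by
  intro length _
  unfold Spec_built_compare_set_s built_compare_set_s_alt
  by_cases hle : length ≤ 0
  · have hA : built_compare_set_s length = [] := by
      unfold built_compare_set_s
      rw [PySem.List.pyRange_one_eq_nil hle]; rfl
    have hG : pvPairs (PySem.Int.floordiv length 2) = [] := by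
      unfold pvPairs
      rw [PySem.List.pyRange_one_eq_nil (by rw [fd_two]; omega)]; rfl
    rw [hA, if_neg (by omega), hG]
  · have hpos : 0 < length := by omega
    obtain ⟨n, rfl⟩ : ∃ n : Nat, length = (n : Int) :=
      ⟨length.toNat, (Int.toNat_of_nonneg (by omega)).symm⟩
    rcases Nat.even_or_odd n with ⟨k, hk⟩ | ⟨k, hk⟩
    · have hc : (n : Int) = 2 * (k : Int) := by subst hk; push_cast; ring
      rw [hc, (parity k).1]
      rw [if_neg (by rw [md_two]; omega),
        show PySem.Int.floordiv (2 * (k:Int)) 2 = (k:Int) by rw [fd_two]; omega]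
    · have hc : (n : Int) = 2 * (k : Int) + 1 := by subst hk; push_cast; ring
      rw [hc, (parity k).2]
      rw [if_pos ⟨by omega, by rw [md_two]; omega⟩,
        show PySem.Int.floordiv (2 * (k:Int) + 1) 2 = (k:Int) by rw [fd_two]; omega]
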